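-- pv_equiv track=rewrite | github.com/raks8877/Daily_Coding_Series | April-18/24-04-18/python/02-Noddy-and-his-Vowel.py | check
-- ===== SOURCE A (Python) =====
-- def check(string):
--     l = len(string)
--     a = False
--     e = False
--     i = False
--     o = False
--     u = False
--
--     for x in range(0,l):
--         if(string[x] == 'a'):
--             a = True
--         if(string[x] == 'e'):
--             e = True
--         if(string[x] == 'i'):
--             i = True
--         if(string[x] == 'o'):
--             o = True
--         if(string[x] == 'u'):
--             u = True
--
--     if(a and e and i and o and u):
--         return True
--     else:
--         return False
-- ===== SOURCE B (Python) =====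
-- def check(string):
--     return all(v in string for v in "aeiou")
-- ===== Notes on version B (the rewrite author's own statement) =====
-- stated objective: idiomatic
-- what changed: Loop transposed: instead of scanning the string character by character updating five boolean flags, B iterates over the five vowels and tests membership of each in the string with all(...); the per-character work moves from interpreted Python into C-level substring search.
import Mathlib
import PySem

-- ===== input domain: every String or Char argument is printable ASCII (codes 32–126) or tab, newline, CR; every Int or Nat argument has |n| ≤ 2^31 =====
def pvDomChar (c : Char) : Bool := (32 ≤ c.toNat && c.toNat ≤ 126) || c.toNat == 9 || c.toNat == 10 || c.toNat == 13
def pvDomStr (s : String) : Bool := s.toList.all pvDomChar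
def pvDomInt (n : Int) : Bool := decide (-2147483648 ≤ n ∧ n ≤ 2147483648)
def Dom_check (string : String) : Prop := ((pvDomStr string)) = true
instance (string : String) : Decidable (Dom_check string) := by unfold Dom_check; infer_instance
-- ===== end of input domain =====

-- B replaces the char-scan with five boolean flags by a loop over the five vowels
-- testing membership in the string (idiomatic; same O(n), measurably faster constant).

-- ===== PORT A =====
-- A indexes string[x] for x in range(0, len(string)), which visits exactly the
-- characters of the string in order: ported as a fold over the character list,
-- carrying the five flags (a, e, i, o, u) and applying the five ifs in order.
def checkStep (st : Bool × Bool × Bool × Bool × Bool) (c : Char) :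
    Bool × Bool × Bool × Bool × Bool :=
  let st := if c == 'a' then (true, st.2) else st
  let st := if c == 'e' then (st.1, true, st.2.2) else st
  let st := if c == 'i' then (st.1, st.2.1, true, st.2.2.2) else st
  let st := if c == 'o' then (st.1, st.2.1, st.2.2.1, true, st.2.2.2.2) else st
  let st := if c == 'u' then (st.1, st.2.1, st.2.2.1, st.2.2.2.1, true) else st
  st

def check (string : String) : Bool :=
  let st := string.toList.foldl checkStep (false, false, false, false, false)
  if st.1 && st.2.1 && st.2.2.1 && st.2.2.2.1 && st.2.2.2.2 then true else false

-- ===== PORT B =====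
-- 'v in string' for the single-character v is character membership in the string.
def check_alt (string : String) : Bool :=
  ['a', 'e', 'i', 'o', 'u'].all (fun v => string.toList.contains v)

-- ===== PRECONDITION & SPEC =====
def Spec_check (string : String) (out : Bool) : Prop := out = check_alt string
instance (string : String) (out : Bool) : Decidable (Spec_check string out) := by unfold Spec_check; infer_instance

-- ===== CLAIM (what is proved, stated in full; the proofs are below) =====
def Claim_equal_check : Prop := ∀ (string : String), Dom_check string → Spec_check string (check string)

-- ===== LEMMAS AND PROOFS =====

-- Invariant of A's loop: each flag ends true iff it started true or its vowel occurs.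
lemma checkStep_foldl (cs : List Char) (st : Bool × Bool × Bool × Bool × Bool) :
    cs.foldl checkStep st =
      (st.1 || cs.contains 'a', st.2.1 || cs.contains 'e', st.2.2.1 || cs.contains 'i',
       st.2.2.2.1 || cs.contains 'o', st.2.2.2.2 || cs.contains 'u') := by
  induction cs generalizing st with
  | nil => simp
  | cons c cs ih =>
    obtain ⟨a, e, i, o, u⟩ := st
    simp only [List.foldl_cons, ih, List.contains_cons]
    have ha : ('a' == c) = decide (c = 'a') := by
      by_cases h : c = 'a'
      · simp [h]
      · simp [h, Ne.symm h]
    have he : ('e' == c) = decide (c = 'e') := by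
      by_cases h : c = 'e'
      · simp [h]
      · simp [h, Ne.symm h]
    have hi : ('i' == c) = decide (c = 'i') := by
      by_cases h : c = 'i'
      · simp [h]
      · simp [h, Ne.symm h]
    have ho : ('o' == c) = decide (c = 'o') := by
      by_cases h : c = 'o'
      · simp [h]
      · simp [h, Ne.symm h]
    have hu : ('u' == c) = decide (c = 'u') := by
      by_cases h : c = 'u'
      · simp [h]
      · simp [h, Ne.symm h]
    simp only [checkStep, ha, he, hi, ho, hu]
    by_cases h1 : c = 'a' <;> by_cases h2 : c = 'e' <;> by_cases h3 : c = 'i' <;>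
      by_cases h4 : c = 'o' <;> by_cases h5 : c = 'u' <;> simp_all

-- ===== VERDICT (by name: the statement is the Claim_ definition above) =====
theorem check_spec : Claim_equal_check := by
  intro s _
  unfold Spec_check check check_alt
  simp [checkStep_foldl]
  ac_rfl
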